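-- pv_equiv track=rewrite | github.com/shirkirtia-art/web-cache-vuln-tool | cache_scanner.py | get_cache_status
-- ===== SOURCE A (Python) =====
-- def get_cache_status(headers):
--     if 'CF-Cache-Status' in headers:
--         status = headers['CF-Cache-Status'].upper()
--         if status in ['HIT', 'REVALIDATED', 'UPDATING']:
--             return 'HIT'
--         elif status in ['MISS', 'BYPASS', 'EXPIRED', 'DYNAMIC', 'BYPASS+MISS', 'BYPASS+HIT']:
--             return 'MISS'
--
--     if 'X-Cache' in headers:
--         xc = headers['X-Cache'].upper()
--         if any(x in xc for x in ['HIT', 'HIT FROM', 'CACHED']):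
--             return 'HIT'
--         elif any(x in xc for x in ['MISS', 'MISS FROM', 'BYPASS', 'UNCACHEABLE']):
--             return 'MISS'
--
--     if 'X-Proxy-Cache' in headers:
--         xpc = headers['X-Proxy-Cache'].upper()
--         if 'HIT' in xpc:
--             return 'HIT'
--         elif any(x in xpc for x in ['MISS', 'BYPASS']):
--             return 'MISS'
--
--     if 'Age' in headers and headers['Age'].isdigit() and int(headers['Age']) > 0:
--         return 'HIT'
--
--     if 'X-Cacheable' in headers:
--         if 'YES' in headers['X-Cacheable'].upper() or 'TRUE' in headers['X-Cacheable'].upper():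
--             return 'HIT'
--
--     return 'UNKNOWN'
-- ===== SOURCE B (Python) =====
-- # B: single pass over the header items with a priority accumulator, instead of
-- # A's fixed chain of keyed lookups: every (name, value) pair is classified
-- # independently into an optional (priority, verdict) candidate, and one fold
-- # keeps the candidate of smallest priority; the answer is its verdict.
-- # Correct because each recognised header name has a distinct priority equal to
-- # its position in A's early-return chain, so the minimum-priority candidate is
-- # exactly the first check that fires in A.
--
-- def _classify(name, value):
--     if name == 'CF-Cache-Status':
--         v = value.upper()
--         if v in ('HIT', 'REVALIDATED', 'UPDATING'):
--             return (0, 'HIT')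
--         if v in ('MISS', 'BYPASS', 'EXPIRED', 'DYNAMIC', 'BYPASS+MISS', 'BYPASS+HIT'):
--             return (0, 'MISS')
--     elif name == 'X-Cache':
--         v = value.upper()
--         if any(p in v for p in ('HIT', 'HIT FROM', 'CACHED')):
--             return (1, 'HIT')
--         if any(p in v for p in ('MISS', 'MISS FROM', 'BYPASS', 'UNCACHEABLE')):
--             return (1, 'MISS')
--     elif name == 'X-Proxy-Cache':
--         v = value.upper()
--         if 'HIT' in v:
--             return (2, 'HIT')
--         if 'MISS' in v or 'BYPASS' in v:
--             return (2, 'MISS')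
--     elif name == 'Age':
--         if value.isdigit() and int(value) > 0:
--             return (3, 'HIT')
--     elif name == 'X-Cacheable':
--         v = value.upper()
--         if 'YES' in v or 'TRUE' in v:
--             return (4, 'HIT')
--     return None
--
--
-- def get_cache_status(headers):
--     best = None
--     for name, value in headers.items():
--         cand = _classify(name, value)
--         if cand is not None and (best is None or cand[0] < best[0]):
--             best = cand
--     return best[1] if best is not None else 'UNKNOWN'
-- ===== Notes on version B (the rewrite author's own statement) =====
-- stated objective: alternative
-- what changed: A's fixed chain of five keyed lookups with early returns is replaced by a single pass over the header items that classifies each (name, value) pair independently into an optional (priority, verdict) candidate and folds them with a minimum-priority accumulator; the answer is the verdict of the best candidate, UNKNOWN if none.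
import Mathlib
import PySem

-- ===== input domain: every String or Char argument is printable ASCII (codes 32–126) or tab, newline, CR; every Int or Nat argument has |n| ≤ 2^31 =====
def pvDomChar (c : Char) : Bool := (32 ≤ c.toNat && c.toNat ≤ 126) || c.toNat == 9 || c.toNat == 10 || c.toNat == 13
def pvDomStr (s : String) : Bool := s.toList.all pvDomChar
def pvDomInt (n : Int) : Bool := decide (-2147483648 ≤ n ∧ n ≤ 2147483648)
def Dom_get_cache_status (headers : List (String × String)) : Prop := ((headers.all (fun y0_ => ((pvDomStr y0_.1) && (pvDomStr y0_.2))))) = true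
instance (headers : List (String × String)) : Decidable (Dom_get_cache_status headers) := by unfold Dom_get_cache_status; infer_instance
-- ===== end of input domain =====

-- B replaces A's fixed chain of keyed lookups by a single pass over the header items
-- that classifies each pair into an optional (priority, verdict) candidate and keeps
-- the minimum-priority one (objective: alternative).

-- ===== PORT A =====
-- A is a chain of early returns; each block becomes an Option String, none meaning "fall through".
def get_cache_status (headers : List (String × String)) : String :=
  let d : PySem.Dict String String := PySem.Dict.mk headers
  let r1 : Option String :=
    match d.get? "CF-Cache-Status" with
    | some v =>
      let status := PySem.Str.upper v
      if (["HIT", "REVALIDATED", "UPDATING"] : List String).contains status then some "HIT"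
      else if (["MISS", "BYPASS", "EXPIRED", "DYNAMIC", "BYPASS+MISS", "BYPASS+HIT"] : List String).contains status then some "MISS"
      else none
    | none => none
  match r1 with
  | some r => r
  | none =>
    let r2 : Option String :=
      match d.get? "X-Cache" with
      | some v =>
        let xc := PySem.Str.upper v
        if (["HIT", "HIT FROM", "CACHED"] : List String).any (fun x => PySem.Str.isIn x xc) then some "HIT"
        else if (["MISS", "MISS FROM", "BYPASS", "UNCACHEABLE"] : List String).any (fun x => PySem.Str.isIn x xc) then some "MISS"
        else none
      | none => none
    match r2 with
    | some r => r
    | none =>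
      let r3 : Option String :=
        match d.get? "X-Proxy-Cache" with
        | some v =>
          let xpc := PySem.Str.upper v
          if PySem.Str.isIn "HIT" xpc then some "HIT"
          else if (["MISS", "BYPASS"] : List String).any (fun x => PySem.Str.isIn x xpc) then some "MISS"
          else none
        | none => none
      match r3 with
      | some r => r
      | none =>
        let ageHit : Bool :=
          match d.get? "Age" with
          | some a => PySem.Str.strIsdigit a && decide (0 < (PySem.Int.ofStr? a).getD 0)
          | none => false
        if ageHit then "HIT"
        else
          let cacheableHit : Bool :=
            match d.get? "X-Cacheable" with
            | some v => PySem.Str.isIn "YES" (PySem.Str.upper v) || PySem.Str.isIn "TRUE" (PySem.Str.upper v)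
            | none => false
          if cacheableHit then "HIT" else "UNKNOWN"

-- ===== PORT B =====
-- _classify(name, value): optional (priority, verdict) candidate for one header pair.
def pvClassify (name : String) (value : String) : Option (Nat × String) :=
  if name = "CF-Cache-Status" then
    let v := PySem.Str.upper value
    if (["HIT", "REVALIDATED", "UPDATING"] : List String).contains v then some (0, "HIT")
    else if (["MISS", "BYPASS", "EXPIRED", "DYNAMIC", "BYPASS+MISS", "BYPASS+HIT"] : List String).contains v then some (0, "MISS")
    else none
  else if name = "X-Cache" then
    let v := PySem.Str.upper value
    if (["HIT", "HIT FROM", "CACHED"] : List String).any (fun p => PySem.Str.isIn p v) then some (1, "HIT")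
    else if (["MISS", "MISS FROM", "BYPASS", "UNCACHEABLE"] : List String).any (fun p => PySem.Str.isIn p v) then some (1, "MISS")
    else none
  else if name = "X-Proxy-Cache" then
    let v := PySem.Str.upper value
    if PySem.Str.isIn "HIT" v then some (2, "HIT")
    else if PySem.Str.isIn "MISS" v || PySem.Str.isIn "BYPASS" v then some (2, "MISS")
    else none
  else if name = "Age" then
    if PySem.Str.strIsdigit value && decide (0 < (PySem.Int.ofStr? value).getD 0) then some (3, "HIT")
    else none
  else if name = "X-Cacheable" then
    let v := PySem.Str.upper value
    if PySem.Str.isIn "YES" v || PySem.Str.isIn "TRUE" v then some (4, "HIT")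
    else none
  else none

-- the body of B's for-loop: fold one header pair into the running best candidate
def pvStep (best : Option (Nat × String)) (p : String × String) : Option (Nat × String) :=
  match pvClassify p.1 p.2 with
  | none => best
  | some c =>
    match best with
    | none => some c
    | some b => if c.1 < b.1 then some c else some b

-- headers.items(): under the assoc-list dict convention (lookup = first match) the
-- items of the dict are the pairs with the FIRST occurrence kept per key; exact there.
def pvItems : List (String × String) → List (String × String)
  | [] => []
  | p :: rest => p :: pvItems (rest.filter (fun q => !(q.1 == p.1)))
termination_by l => l.length
decreasing_by
  simp only [List.length_cons, List.length_unattach]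
  exact Nat.lt_succ_of_le (le_trans (List.length_filter_le _ _) (le_of_eq List.length_attach))

def get_cache_status_alt (headers : List (String × String)) : String :=
  match (pvItems headers).foldl pvStep none with
  | some b => b.2
  | none => "UNKNOWN"

-- ===== PRECONDITION & SPEC =====
def Spec_get_cache_status (headers : List (String × String)) (out : String) : Prop := out = get_cache_status_alt headers
instance (headers : List (String × String)) (out : String) : Decidable (Spec_get_cache_status headers out) := by unfold Spec_get_cache_status; infer_instance

-- ===== CLAIM (what is proved, stated in full; the proofs are below) =====
def Claim_equal_get_cache_status : Prop := ∀ (headers : List (String × String)), Dom_get_cache_status headers → Spec_get_cache_status headers (get_cache_status headers)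

-- ===== LEMMAS AND PROOFS =====

-- left-biased minimum-priority merge: pvStep b p = pvCombine b (pvClassify p.1 p.2)
def pvCombine (a b : Option (Nat × String)) : Option (Nat × String) :=
  match a, b with
  | none, b => b
  | some x, none => some x
  | some x, some y => if y.1 < x.1 then some y else some x

lemma pvStep_eq (b : Option (Nat × String)) (p : String × String) :
    pvStep b p = pvCombine b (pvClassify p.1 p.2) := by
  unfold pvStep pvCombine
  cases pvClassify p.1 p.2 <;> cases b <;> rfl

lemma pvCombine_none_left (b : Option (Nat × String)) : pvCombine none b = b := rfl

lemma pvCombine_none_right (a : Option (Nat × String)) : pvCombine a none = a := by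
  cases a <;> rfl

lemma pvCombine_assoc (a b c : Option (Nat × String)) :
    pvCombine (pvCombine a b) c = pvCombine a (pvCombine b c) := by
  rcases a with _ | x <;> rcases b with _ | y <;> rcases c with _ | z <;>
    simp only [pvCombine] <;> (try split_ifs) <;> (try simp only [pvCombine]) <;>
    (try split_ifs) <;> first | rfl | omega

lemma pvFoldl_acc (l : List (String × String)) (a : Option (Nat × String)) :
    l.foldl pvStep a = pvCombine a (l.foldl pvStep none) := by
  induction l generalizing a with
  | nil => simp [List.foldl_nil, pvCombine_none_right]
  | cons x t ih =>
    simp only [List.foldl_cons]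
    rw [ih (pvStep a x), ih (pvStep none x), pvStep_eq a x, pvStep_eq none x,
        pvCombine_none_left]
    exact pvCombine_assoc _ _ _

-- swap two candidates whose priorities can never be equal
lemma pvCombine_swap (a b c : Option (Nat × String))
    (h : ∀ x y, a = some x → b = some y → x.1 ≠ y.1) :
    pvCombine a (pvCombine b c) = pvCombine b (pvCombine a c) := by
  rcases ha : a with _ | x <;> rcases hb : b with _ | y <;> rcases c with _ | z <;>
    simp only [pvCombine] <;> (try split_ifs) <;> (try simp only [pvCombine]) <;>
    (try split_ifs) <;>
    first | rfl | omega | (exact absurd (h x y ha hb) (by omega))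

-- classification priorities per recognised name
lemma pvClassify_prio0 (v : String) (x : Nat × String) :
    pvClassify "CF-Cache-Status" v = some x → x.1 = 0 := by
  unfold pvClassify
  simp only [String.reduceEq, reduceIte]
  split_ifs <;> rintro ⟨⟩ <;> rfl

lemma pvClassify_prio1 (v : String) (x : Nat × String) :
    pvClassify "X-Cache" v = some x → x.1 = 1 := by
  unfold pvClassify
  simp only [String.reduceEq, reduceIte]
  split_ifs <;> rintro ⟨⟩ <;> rfl

lemma pvClassify_prio2 (v : String) (x : Nat × String) :
    pvClassify "X-Proxy-Cache" v = some x → x.1 = 2 := by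
  unfold pvClassify
  simp only [String.reduceEq, reduceIte]
  split_ifs <;> rintro ⟨⟩ <;> rfl

lemma pvClassify_prio3 (v : String) (x : Nat × String) :
    pvClassify "Age" v = some x → x.1 = 3 := by
  unfold pvClassify
  simp only [String.reduceEq, reduceIte]
  split_ifs <;> rintro ⟨⟩ <;> rfl

lemma pvClassify_prio4 (v : String) (x : Nat × String) :
    pvClassify "X-Cacheable" v = some x → x.1 = 4 := by
  unfold pvClassify
  simp only [String.reduceEq, reduceIte]
  split_ifs <;> rintro ⟨⟩ <;> rfl

-- classification of a name that is none of the five recognised headers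
lemma pvClassify_other (n v : String)
    (h0 : n ≠ "CF-Cache-Status") (h1 : n ≠ "X-Cache") (h2 : n ≠ "X-Proxy-Cache")
    (h3 : n ≠ "Age") (h4 : n ≠ "X-Cacheable") : pvClassify n v = none := by
  unfold pvClassify
  simp [h0, h1, h2, h3, h4]

-- lookup candidate per name: what A's keyed lookup contributes
def pvVd (n : String) (o : Option String) : Option (Nat × String) :=
  match o with
  | some v => pvClassify n v
  | none => none

lemma pvVd_prio (n : String) (j : Nat)
    (h : ∀ v x, pvClassify n v = some x → x.1 = j) :
    ∀ o x, pvVd n o = some x → x.1 = j := by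
  intro o x hx
  rcases o with _ | w
  · exact absurd hx (by simp [pvVd])
  · exact h w x hx

lemma pvVd_some (n v : String) : pvVd n (some v) = pvClassify n v := rfl

def pvLook (l : List (String × String)) (n : String) : Option String :=
  (PySem.Dict.mk l).get? n

-- the five candidates merged in chain order
def pvCand (l : List (String × String)) : Option (Nat × String) :=
  pvCombine (pvVd "CF-Cache-Status" (pvLook l "CF-Cache-Status"))
    (pvCombine (pvVd "X-Cache" (pvLook l "X-Cache"))
      (pvCombine (pvVd "X-Proxy-Cache" (pvLook l "X-Proxy-Cache"))
        (pvCombine (pvVd "Age" (pvLook l "Age"))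
          (pvVd "X-Cacheable" (pvLook l "X-Cacheable")))))

lemma pvLook_cons (k v : String) (rest : List (String × String)) (n : String) :
    pvLook ((k, v) :: rest) n = if k = n then some v else pvLook rest n := by
  unfold pvLook
  rw [PySem.Dict.get?_mk_cons]
  by_cases h : k = n
  · simp [h]
  · simp [h]

lemma pvItems_nil : pvItems [] = [] := by rw [pvItems.eq_def]

lemma pvItems_cons (p : String × String) (rest : List (String × String)) :
    pvItems (p :: rest) = p :: pvItems (rest.filter (fun q => !(q.1 == p.1))) := by
  rw [pvItems.eq_def]

lemma pvLook_filter_ne (rest : List (String × String)) (k n : String) (h : k ≠ n) :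
    pvLook (rest.filter (fun q => !(q.1 == k))) n = pvLook rest n := by
  induction rest with
  | nil => rfl
  | cons p t ih =>
    obtain ⟨a, b⟩ := p
    by_cases hk : a = k
    · subst hk
      simp only [List.filter_cons]
      simp only [beq_self_eq_true, Bool.not_true, Bool.false_eq_true, if_false]
      rw [ih, pvLook_cons a b t n, if_neg h]
    · simp only [List.filter_cons]
      have hb : (((a, b) : String × String).1 == k) = false := by simp [hk]
      rw [hb]
      simp only [Bool.not_false, if_true]
      rw [pvLook_cons a b _ n, pvLook_cons a b t n, ih]

lemma pvLook_filter_self (rest : List (String × String)) (k : String) :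
    pvLook (rest.filter (fun q => !(q.1 == k))) k = none := by
  induction rest with
  | nil => rfl
  | cons p t ih =>
    obtain ⟨a, b⟩ := p
    by_cases hk : a = k
    · subst hk
      simp only [List.filter_cons]
      simp only [beq_self_eq_true, Bool.not_true, Bool.false_eq_true, if_false]
      exact ih
    · simp only [List.filter_cons]
      have hb : (((a, b) : String × String).1 == k) = false := by simp [hk]
      rw [hb]
      simp only [Bool.not_false, if_true]
      rw [pvLook_cons a b _ k, if_neg hk]
      exact ih

lemma pvCombine_keep (j : Nat) (r : String) (o : Option (Nat × String))
    (h : ∀ x, o = some x → j ≤ x.1) :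
    pvCombine (some (j, r)) o = some (j, r) := by
  rcases ho : o with _ | x
  · rfl
  · have := h x ho
    simp only [pvCombine]
    rw [if_neg (by omega)]

lemma pvCombine_some_cases (a b : Option (Nat × String)) (x : Nat × String)
    (h : pvCombine a b = some x) : a = some x ∨ b = some x := by
  rcases a with _ | y <;> rcases b with _ | z <;> simp_all [pvCombine]
  split_ifs at h <;> simp_all

-- characterisation: the fold over the dict's items computes the chain-order merge
lemma pvFold_eq_cand (l : List (String × String)) :
    (pvItems l).foldl pvStep none = pvCand l := by
  generalize hn : l.length = n
  induction n using Nat.strong_induction_on generalizing l with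
  | _ n ih =>
  cases l with
  | nil =>
    rw [pvItems_nil]
    rfl
  | cons p rest =>
    obtain ⟨k, v⟩ := p
    have hlen : (rest.filter (fun q => !(q.1 == k))).length < n := by
      have := List.length_filter_le (fun q => !(q.1 == k)) rest
      simp only [List.length_cons] at hn
      omega
    have IH := ih _ hlen (rest.filter (fun q => !(q.1 == k))) rfl
    rw [pvItems_cons (k, v) rest]
    simp only [List.foldl_cons]
    rw [pvFoldl_acc, IH, pvStep_eq, pvCombine_none_left]
    -- now: pvCombine (pvClassify k v) (pvCand (rest.filter …)) = pvCand ((k,v) :: rest)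
    by_cases h0 : k = "CF-Cache-Status"
    · subst h0
      unfold pvCand
      rw [pvLook_filter_self rest _,
          pvLook_filter_ne rest _ "X-Cache" (by decide),
          pvLook_filter_ne rest _ "X-Proxy-Cache" (by decide),
          pvLook_filter_ne rest _ "Age" (by decide),
          pvLook_filter_ne rest _ "X-Cacheable" (by decide),
          pvLook_cons _ v rest "CF-Cache-Status",
          pvLook_cons _ v rest "X-Cache",
          pvLook_cons _ v rest "X-Proxy-Cache",
          pvLook_cons _ v rest "Age",
          pvLook_cons _ v rest "X-Cacheable",
          if_pos rfl,
          if_neg (show ¬(("CF-Cache-Status" : String) = "X-Cache") from by decide),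
          if_neg (show ¬(("CF-Cache-Status" : String) = "X-Proxy-Cache") from by decide),
          if_neg (show ¬(("CF-Cache-Status" : String) = "Age") from by decide),
          if_neg (show ¬(("CF-Cache-Status" : String) = "X-Cacheable") from by decide)]
      simp only [pvVd, pvCombine_none_left]
    · by_cases h1 : k = "X-Cache"
      · subst h1
        unfold pvCand
        rw [pvLook_filter_self rest _,
            pvLook_filter_ne rest _ "CF-Cache-Status" (by decide),
            pvLook_filter_ne rest _ "X-Proxy-Cache" (by decide),
            pvLook_filter_ne rest _ "Age" (by decide),
            pvLook_filter_ne rest _ "X-Cacheable" (by decide),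
            pvLook_cons _ v rest "CF-Cache-Status",
            pvLook_cons _ v rest "X-Cache",
            pvLook_cons _ v rest "X-Proxy-Cache",
            pvLook_cons _ v rest "Age",
            pvLook_cons _ v rest "X-Cacheable",
            if_pos rfl,
            if_neg (show ¬(("X-Cache" : String) = "CF-Cache-Status") from by decide),
            if_neg (show ¬(("X-Cache" : String) = "X-Proxy-Cache") from by decide),
            if_neg (show ¬(("X-Cache" : String) = "Age") from by decide),
            if_neg (show ¬(("X-Cache" : String) = "X-Cacheable") from by decide)]
        simp only [pvVd, pvCombine_none_left]
        exact pvCombine_swap _ _ _ (fun x y hx hy => by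
          have e1 := pvClassify_prio1 v x hx
          have e0 := pvVd_prio _ _ pvClassify_prio0 _ y hy
          omega)
      · by_cases h2 : k = "X-Proxy-Cache"
        · subst h2
          unfold pvCand
          rw [pvLook_filter_self rest _,
              pvLook_filter_ne rest _ "CF-Cache-Status" (by decide),
              pvLook_filter_ne rest _ "X-Cache" (by decide),
              pvLook_filter_ne rest _ "Age" (by decide),
              pvLook_filter_ne rest _ "X-Cacheable" (by decide),
              pvLook_cons _ v rest "CF-Cache-Status",
              pvLook_cons _ v rest "X-Cache",
              pvLook_cons _ v rest "X-Proxy-Cache",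
              pvLook_cons _ v rest "Age",
              pvLook_cons _ v rest "X-Cacheable",
              if_pos rfl,
              if_neg (show ¬(("X-Proxy-Cache" : String) = "CF-Cache-Status") from by decide),
              if_neg (show ¬(("X-Proxy-Cache" : String) = "X-Cache") from by decide),
              if_neg (show ¬(("X-Proxy-Cache" : String) = "Age") from by decide),
              if_neg (show ¬(("X-Proxy-Cache" : String) = "X-Cacheable") from by decide)]
          simp only [pvVd, pvCombine_none_left]
          rw [pvCombine_swap (pvClassify "X-Proxy-Cache" v) _ _ (fun x y hx hy => by
            have e2 := pvClassify_prio2 v x hx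
            have e0 := pvVd_prio _ _ pvClassify_prio0 _ y hy
            omega)]
          congr 1
          exact pvCombine_swap _ _ _ (fun x y hx hy => by
            have e2 := pvClassify_prio2 v x hx
            have e1 := pvVd_prio _ _ pvClassify_prio1 _ y hy
            omega)
        · by_cases h3 : k = "Age"
          · subst h3
            unfold pvCand
            rw [pvLook_filter_self rest _,
                pvLook_filter_ne rest _ "CF-Cache-Status" (by decide),
                pvLook_filter_ne rest _ "X-Cache" (by decide),
                pvLook_filter_ne rest _ "X-Proxy-Cache" (by decide),
                pvLook_filter_ne rest _ "X-Cacheable" (by decide),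
                pvLook_cons _ v rest "CF-Cache-Status",
                pvLook_cons _ v rest "X-Cache",
                pvLook_cons _ v rest "X-Proxy-Cache",
                pvLook_cons _ v rest "Age",
                pvLook_cons _ v rest "X-Cacheable",
                if_pos rfl,
                if_neg (show ¬(("Age" : String) = "CF-Cache-Status") from by decide),
                if_neg (show ¬(("Age" : String) = "X-Cache") from by decide),
                if_neg (show ¬(("Age" : String) = "X-Proxy-Cache") from by decide),
                if_neg (show ¬(("Age" : String) = "X-Cacheable") from by decide)]
            simp only [pvVd, pvCombine_none_left]
            rw [pvCombine_swap (pvClassify "Age" v) _ _ (fun x y hx hy => by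
              have e3 := pvClassify_prio3 v x hx
              have e0 := pvVd_prio _ _ pvClassify_prio0 _ y hy
              omega)]
            congr 1
            rw [pvCombine_swap (pvClassify "Age" v) _ _ (fun x y hx hy => by
              have e3 := pvClassify_prio3 v x hx
              have e1 := pvVd_prio _ _ pvClassify_prio1 _ y hy
              omega)]
            congr 1
            exact pvCombine_swap _ _ _ (fun x y hx hy => by
              have e3 := pvClassify_prio3 v x hx
              have e2 := pvVd_prio _ _ pvClassify_prio2 _ y hy
              omega)
          · by_cases h4 : k = "X-Cacheable"
            · subst h4
              unfold pvCand
              rw [pvLook_filter_self rest _,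
                  pvLook_filter_ne rest _ "CF-Cache-Status" (by decide),
                  pvLook_filter_ne rest _ "X-Cache" (by decide),
                  pvLook_filter_ne rest _ "X-Proxy-Cache" (by decide),
                  pvLook_filter_ne rest _ "Age" (by decide),
                  pvLook_cons _ v rest "CF-Cache-Status",
                  pvLook_cons _ v rest "X-Cache",
                  pvLook_cons _ v rest "X-Proxy-Cache",
                  pvLook_cons _ v rest "Age",
                  pvLook_cons _ v rest "X-Cacheable",
                  if_pos rfl,
                  if_neg (show ¬(("X-Cacheable" : String) = "CF-Cache-Status") from by decide),
                  if_neg (show ¬(("X-Cacheable" : String) = "X-Cache") from by decide),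
                  if_neg (show ¬(("X-Cacheable" : String) = "X-Proxy-Cache") from by decide),
                  if_neg (show ¬(("X-Cacheable" : String) = "Age") from by decide)]
              simp only [pvVd, pvCombine_none_right]
              rw [pvCombine_swap (pvClassify "X-Cacheable" v) _ _ (fun x y hx hy => by
                have e4 := pvClassify_prio4 v x hx
                have e0 := pvVd_prio _ _ pvClassify_prio0 _ y hy
                omega)]
              congr 1
              rw [pvCombine_swap (pvClassify "X-Cacheable" v) _ _ (fun x y hx hy => by
                have e4 := pvClassify_prio4 v x hx
                have e1 := pvVd_prio _ _ pvClassify_prio1 _ y hy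
                omega)]
              congr 1
              rw [pvCombine_swap (pvClassify "X-Cacheable" v) _ _ (fun x y hx hy => by
                have e4 := pvClassify_prio4 v x hx
                have e2 := pvVd_prio _ _ pvClassify_prio2 _ y hy
                omega)]
              congr 1
              have hsw := pvCombine_swap (pvClassify "X-Cacheable" v)
                (pvVd "Age" (pvLook rest "Age")) none (fun x y hx hy => by
                  have e4 := pvClassify_prio4 v x hx
                  have e3 := pvVd_prio _ _ pvClassify_prio3 _ y hy
                  omega)
              rw [pvCombine_none_right, pvCombine_none_right] at hsw
              exact hsw
            · have hcl : pvClassify k v = none := pvClassify_other k v h0 h1 h2 h3 h4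
              rw [hcl, pvCombine_none_left]
              unfold pvCand
              rw [pvLook_filter_ne rest k "CF-Cache-Status" h0,
                  pvLook_filter_ne rest k "X-Cache" h1,
                  pvLook_filter_ne rest k "X-Proxy-Cache" h2,
                  pvLook_filter_ne rest k "Age" h3,
                  pvLook_filter_ne rest k "X-Cacheable" h4,
                  pvLook_cons k v rest "CF-Cache-Status",
                  pvLook_cons k v rest "X-Cache",
                  pvLook_cons k v rest "X-Proxy-Cache",
                  pvLook_cons k v rest "Age",
                  pvLook_cons k v rest "X-Cacheable",
                  if_neg h0, if_neg h1, if_neg h2, if_neg h3, if_neg h4]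

def pvFinal : Option (Nat × String) → String
  | some b => b.2
  | none => "UNKNOWN"

-- level 4: X-Cacheable
lemma pvLevel4 (o4 : Option String) :
    pvFinal (pvVd "X-Cacheable" o4) =
      (let cacheableHit : Bool :=
        match o4 with
        | some v => PySem.Str.isIn "YES" (PySem.Str.upper v) || PySem.Str.isIn "TRUE" (PySem.Str.upper v)
        | none => false
      if cacheableHit then "HIT" else "UNKNOWN") := by
  rcases o4 with _ | v
  · rfl
  · rw [pvVd_some]
    unfold pvClassify
    simp only [String.reduceEq, reduceIte]
    by_cases hc : (PySem.Str.isIn "YES" (PySem.Str.upper v) || PySem.Str.isIn "TRUE" (PySem.Str.upper v)) = true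
    · rw [if_pos hc]
      simp_all [pvFinal]
    · rw [if_neg hc]
      simp_all [pvFinal]

-- level 3: Age, then X-Cacheable
lemma pvLevel3 (o3 o4 : Option String) :
    pvFinal (pvCombine (pvVd "Age" o3) (pvVd "X-Cacheable" o4)) =
      (let ageHit : Bool :=
        match o3 with
        | some a => PySem.Str.strIsdigit a && decide (0 < (PySem.Int.ofStr? a).getD 0)
        | none => false
      if ageHit then "HIT"
      else
        let cacheableHit : Bool :=
          match o4 with
          | some v => PySem.Str.isIn "YES" (PySem.Str.upper v) || PySem.Str.isIn "TRUE" (PySem.Str.upper v)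
          | none => false
        if cacheableHit then "HIT" else "UNKNOWN") := by
  rcases o3 with _ | a
  · rw [show pvVd "Age" none = none from rfl, pvCombine_none_left]
    exact pvLevel4 o4
  · rw [pvVd_some]
    unfold pvClassify
    simp only [String.reduceEq, reduceIte]
    by_cases hc : (PySem.Str.strIsdigit a && decide (0 < (PySem.Int.ofStr? a).getD 0)) = true
    · rw [if_pos hc, pvCombine_keep 3 "HIT" _ (fun x hx => by
        have := pvVd_prio _ _ pvClassify_prio4 _ x hx; omega)]
      simp_all [pvFinal]
    · rw [if_neg hc, pvCombine_none_left, pvLevel4 o4]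
      simp_all

-- level 2: X-Proxy-Cache, then level 3
lemma pvLevel2 (o2 o3 o4 : Option String) :
    pvFinal (pvCombine (pvVd "X-Proxy-Cache" o2)
        (pvCombine (pvVd "Age" o3) (pvVd "X-Cacheable" o4))) =
      (let r3 : Option String :=
        match o2 with
        | some v =>
          let xpc := PySem.Str.upper v
          if PySem.Str.isIn "HIT" xpc then some "HIT"
          else if (["MISS", "BYPASS"] : List String).any (fun x => PySem.Str.isIn x xpc) then some "MISS"
          else none
        | none => none
      match r3 with
      | some r => r
      | none =>
        let ageHit : Bool :=
          match o3 with
          | some a => PySem.Str.strIsdigit a && decide (0 < (PySem.Int.ofStr? a).getD 0)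
          | none => false
        if ageHit then "HIT"
        else
          let cacheableHit : Bool :=
            match o4 with
            | some v => PySem.Str.isIn "YES" (PySem.Str.upper v) || PySem.Str.isIn "TRUE" (PySem.Str.upper v)
            | none => false
          if cacheableHit then "HIT" else "UNKNOWN") := by
  have hb : ∀ x, pvCombine (pvVd "Age" o3) (pvVd "X-Cacheable" o4) = some x → 2 ≤ x.1 := by
    intro x hx
    rcases pvCombine_some_cases _ _ _ hx with h | h
    · have := pvVd_prio _ _ pvClassify_prio3 _ x h; omega
    · have := pvVd_prio _ _ pvClassify_prio4 _ x h; omega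
  rcases o2 with _ | v
  · rw [show pvVd "X-Proxy-Cache" none = none from rfl, pvCombine_none_left]
    exact pvLevel3 o3 o4
  · rw [pvVd_some]
    unfold pvClassify
    simp only [String.reduceEq, reduceIte]
    by_cases c1 : PySem.Str.isIn "HIT" (PySem.Str.upper v) = true
    · rw [if_pos c1, pvCombine_keep 2 "HIT" _ hb]
      simp_all [pvFinal]
    · rw [if_neg c1]
      by_cases c2 : (PySem.Str.isIn "MISS" (PySem.Str.upper v) || PySem.Str.isIn "BYPASS" (PySem.Str.upper v)) = true
      · rw [if_pos c2, pvCombine_keep 2 "MISS" _ hb]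
        simp_all [pvFinal]
      · rw [if_neg c2, pvCombine_none_left, pvLevel3 o3 o4]
        simp_all

-- level 1: X-Cache, then level 2
lemma pvLevel1 (o1 o2 o3 o4 : Option String) :
    pvFinal (pvCombine (pvVd "X-Cache" o1)
        (pvCombine (pvVd "X-Proxy-Cache" o2)
          (pvCombine (pvVd "Age" o3) (pvVd "X-Cacheable" o4)))) =
      (let r2 : Option String :=
        match o1 with
        | some v =>
          let xc := PySem.Str.upper v
          if (["HIT", "HIT FROM", "CACHED"] : List String).any (fun x => PySem.Str.isIn x xc) then some "HIT"
          else if (["MISS", "MISS FROM", "BYPASS", "UNCACHEABLE"] : List String).any (fun x => PySem.Str.isIn x xc) then some "MISS"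
          else none
        | none => none
      match r2 with
      | some r => r
      | none =>
        let r3 : Option String :=
          match o2 with
          | some v =>
            let xpc := PySem.Str.upper v
            if PySem.Str.isIn "HIT" xpc then some "HIT"
            else if (["MISS", "BYPASS"] : List String).any (fun x => PySem.Str.isIn x xpc) then some "MISS"
            else none
          | none => none
        match r3 with
        | some r => r
        | none =>
          let ageHit : Bool :=
            match o3 with
            | some a => PySem.Str.strIsdigit a && decide (0 < (PySem.Int.ofStr? a).getD 0)
            | none => false
          if ageHit then "HIT"
          else
            let cacheableHit : Bool :=
              match o4 with
              | some v => PySem.Str.isIn "YES" (PySem.Str.upper v) || PySem.Str.isIn "TRUE" (PySem.Str.upper v)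
              | none => false
            if cacheableHit then "HIT" else "UNKNOWN") := by
  have hb : ∀ x, pvCombine (pvVd "X-Proxy-Cache" o2)
      (pvCombine (pvVd "Age" o3) (pvVd "X-Cacheable" o4)) = some x → 1 ≤ x.1 := by
    intro x hx
    rcases pvCombine_some_cases _ _ _ hx with h | h
    · have := pvVd_prio _ _ pvClassify_prio2 _ x h; omega
    · rcases pvCombine_some_cases _ _ _ h with h' | h'
      · have := pvVd_prio _ _ pvClassify_prio3 _ x h'; omega
      · have := pvVd_prio _ _ pvClassify_prio4 _ x h'; omega
  rcases o1 with _ | v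
  · rw [show pvVd "X-Cache" none = none from rfl, pvCombine_none_left]
    exact pvLevel2 o2 o3 o4
  · rw [pvVd_some]
    unfold pvClassify
    simp only [String.reduceEq, reduceIte]
    by_cases c1 : ((["HIT", "HIT FROM", "CACHED"] : List String).any (fun p => PySem.Str.isIn p (PySem.Str.upper v))) = true
    · rw [if_pos c1, pvCombine_keep 1 "HIT" _ hb]
      simp_all [pvFinal]
    · rw [if_neg c1]
      by_cases c2 : ((["MISS", "MISS FROM", "BYPASS", "UNCACHEABLE"] : List String).any (fun p => PySem.Str.isIn p (PySem.Str.upper v))) = true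
      · rw [if_pos c2, pvCombine_keep 1 "MISS" _ hb]
        simp_all [pvFinal]
      · rw [if_neg c2, pvCombine_none_left, pvLevel2 o2 o3 o4]
        simp_all

-- level 0: CF-Cache-Status, then level 1 — the whole chain in A's shape
lemma pvLevel0 (o0 o1 o2 o3 o4 : Option String) :
    pvFinal (pvCombine (pvVd "CF-Cache-Status" o0)
        (pvCombine (pvVd "X-Cache" o1)
          (pvCombine (pvVd "X-Proxy-Cache" o2)
            (pvCombine (pvVd "Age" o3) (pvVd "X-Cacheable" o4))))) =
      (let r1 : Option String :=
        match o0 with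
        | some v =>
          let status := PySem.Str.upper v
          if (["HIT", "REVALIDATED", "UPDATING"] : List String).contains status then some "HIT"
          else if (["MISS", "BYPASS", "EXPIRED", "DYNAMIC", "BYPASS+MISS", "BYPASS+HIT"] : List String).contains status then some "MISS"
          else none
        | none => none
      match r1 with
      | some r => r
      | none =>
        let r2 : Option String :=
          match o1 with
          | some v =>
            let xc := PySem.Str.upper v
            if (["HIT", "HIT FROM", "CACHED"] : List String).any (fun x => PySem.Str.isIn x xc) then some "HIT"
            else if (["MISS", "MISS FROM", "BYPASS", "UNCACHEABLE"] : List String).any (fun x => PySem.Str.isIn x xc) then some "MISS"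
            else none
          | none => none
        match r2 with
        | some r => r
        | none =>
          let r3 : Option String :=
            match o2 with
            | some v =>
              let xpc := PySem.Str.upper v
              if PySem.Str.isIn "HIT" xpc then some "HIT"
              else if (["MISS", "BYPASS"] : List String).any (fun x => PySem.Str.isIn x xpc) then some "MISS"
              else none
            | none => none
          match r3 with
          | some r => r
          | none =>
            let ageHit : Bool :=
              match o3 with
              | some a => PySem.Str.strIsdigit a && decide (0 < (PySem.Int.ofStr? a).getD 0)
              | none => false
            if ageHit then "HIT"
            else
              let cacheableHit : Bool :=
                match o4 with
                | some v => PySem.Str.isIn "YES" (PySem.Str.upper v) || PySem.Str.isIn "TRUE" (PySem.Str.upper v)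
                | none => false
              if cacheableHit then "HIT" else "UNKNOWN") := by
  rcases o0 with _ | v
  · rw [show pvVd "CF-Cache-Status" none = none from rfl, pvCombine_none_left]
    exact pvLevel1 o1 o2 o3 o4
  · rw [pvVd_some]
    unfold pvClassify
    simp only [String.reduceEq, reduceIte]
    by_cases c1 : ((["HIT", "REVALIDATED", "UPDATING"] : List String).contains (PySem.Str.upper v)) = true
    · rw [if_pos c1, pvCombine_keep 0 "HIT" _ (fun x _ => Nat.zero_le _)]
      simp_all [pvFinal]
    · rw [if_neg c1]
      by_cases c2 : ((["MISS", "BYPASS", "EXPIRED", "DYNAMIC", "BYPASS+MISS", "BYPASS+HIT"] : List String).contains (PySem.Str.upper v)) = true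
      · rw [if_pos c2, pvCombine_keep 0 "MISS" _ (fun x _ => Nat.zero_le _)]
        simp_all [pvFinal]
      · rw [if_neg c2, pvCombine_none_left, pvLevel1 o1 o2 o3 o4]
        simp_all

-- ===== VERDICT (by name: the statement is the Claim_ definition above) =====
set_option maxHeartbeats 1000000 in
theorem get_cache_status_spec : Claim_equal_get_cache_status := by
  intro headers _
  unfold Spec_get_cache_status
  have halt : get_cache_status_alt headers = pvFinal (pvCand headers) := by
    unfold get_cache_status_alt
    rw [pvFold_eq_cand]
    rfl
  rw [halt]
  unfold pvCand pvLook
  rw [pvLevel0 ((PySem.Dict.mk headers).get? "CF-Cache-Status")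
    ((PySem.Dict.mk headers).get? "X-Cache")
    ((PySem.Dict.mk headers).get? "X-Proxy-Cache")
    ((PySem.Dict.mk headers).get? "Age")
    ((PySem.Dict.mk headers).get? "X-Cacheable")]
  rfl
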